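-- pv_equiv track=rewrite | github.com/DaviRaubach/omcwb | omcwb/A/write_lyrics.py | write_lyrics
-- ===== SOURCE A (Python) =====
-- from itertools import cycle
--
-- def write_lyrics(text, syllable_counts):
--     lyrics = r" "
--     lines = cycle(text.splitlines())
--     for i in range(syllable_counts):
--         lyrics += next(lines) + " "
--     new_string_lines = r""
--     for line in lyrics.splitlines():
--         new_string_lines = new_string_lines + (r" \markup \scratched " + line)
--     return lyrics
-- ===== SOURCE B (Python) =====
-- def write_lyrics(text, syllable_counts):
--     lines = text.splitlines()
--     n = max(syllable_counts, 0)
--     if not lines: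
--         # empty text: there is nothing to cycle through
--         return " "
--     q, r = divmod(n, len(lines))
--     block = "".join(line + " " for line in lines)
--     return " " + block * q + "".join(line + " " for line in lines[:r])
-- ===== Notes on version B (the rewrite author's own statement) =====
-- stated objective: alternative
-- what changed: Replaces the one-line-at-a-time cycle loop (and A's dead second loop) with whole-block repetition: divmod(n, len(lines)) gives how many full passes and the remainder, and the result is ' ' + block*q + the first r lines joined.
import Mathlib
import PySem

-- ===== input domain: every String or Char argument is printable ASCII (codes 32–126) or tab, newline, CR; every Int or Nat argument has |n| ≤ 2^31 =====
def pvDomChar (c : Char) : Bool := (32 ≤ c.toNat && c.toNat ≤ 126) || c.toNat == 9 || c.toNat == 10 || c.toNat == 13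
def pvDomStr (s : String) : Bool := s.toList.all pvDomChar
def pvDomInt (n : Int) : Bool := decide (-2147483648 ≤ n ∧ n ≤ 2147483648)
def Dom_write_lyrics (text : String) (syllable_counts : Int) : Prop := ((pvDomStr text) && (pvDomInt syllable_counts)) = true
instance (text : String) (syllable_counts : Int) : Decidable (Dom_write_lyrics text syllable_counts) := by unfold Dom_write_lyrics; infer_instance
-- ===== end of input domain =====

-- B replaces A's one-line-at-a-time cycle loop (and A's dead second loop) by whole-block
-- repetition via divmod. A raises StopIteration on empty text with syllable_counts > 0;
-- those inputs are outside Pre_ (B returns " " there).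


-- ===== PORT A =====
-- 'cycle(lines)' advanced i times yields lines[i % len(lines)]; exact for nonempty lines
-- (empty lines with syllable_counts > 0, where next() raises StopIteration, is outside Pre_).
def write_lyrics (text : String) (syllable_counts : Int) : String :=
  let lines := PySem.Str.splitlines text
  let lyrics := (List.range syllable_counts.toNat).foldl
    (fun lyr i => lyr ++ lines.getD (i % lines.length) "" ++ " ") " "
  -- A's dead second loop: computed exactly as in A, its result is discarded
  let new_string_lines := (PySem.Str.splitlines lyrics).foldl
    (fun acc line => acc ++ " \\markup \\scratched " ++ line) ""
  let _ := new_string_lines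
  lyrics

-- ===== PORT B =====
def write_lyrics_alt (text : String) (syllable_counts : Int) : String :=
  let lines := PySem.Str.splitlines text
  let n := (max syllable_counts 0).toNat
  if lines = [] then " "
  else
    let q := n / lines.length
    let r := n % lines.length
    let block := PySem.Str.join "" (lines.map (fun line => line ++ " "))
    " " ++ PySem.Str.join "" (List.replicate q block)
        ++ PySem.Str.join "" ((lines.take r).map (fun line => line ++ " "))

-- ===== PRECONDITION & SPEC =====
-- Pre_ excludes exactly the inputs where A raises StopIteration: a positive count with
-- a text that has no lines (splitlines text = [], i.e. the empty string).
def Pre_write_lyrics (text : String) (syllable_counts : Int) : Prop :=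
  0 < syllable_counts → PySem.Str.splitlines text ≠ []
instance (text : String) (syllable_counts : Int) : Decidable (Pre_write_lyrics text syllable_counts) := by unfold Pre_write_lyrics; infer_instance

def pvWitness_write_lyrics : String × Int := ("la la\nla", 5)

def Spec_write_lyrics (text : String) (syllable_counts : Int) (out : String) : Prop := out = write_lyrics_alt text syllable_counts
instance (text : String) (syllable_counts : Int) (out : String) : Decidable (Spec_write_lyrics text syllable_counts out) := by unfold Spec_write_lyrics; infer_instance

-- ===== CLAIM (what is proved, stated in full; the proofs are below) =====
def Claim_equal_write_lyrics : Prop := ∀ (text : String) (syllable_counts : Int), Dom_write_lyrics text syllable_counts → Pre_write_lyrics text syllable_counts → Spec_write_lyrics text syllable_counts (write_lyrics text syllable_counts)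

-- ===== LEMMAS AND PROOFS =====

-- folding `acc ++ g x` over a list, seen through toList
lemma pvFoldlToList {β : Type} (l : List β) (g : β → String) (init : String) :
    (l.foldl (fun a x => a ++ g x) init).toList
      = init.toList ++ l.flatMap (fun x => (g x).toList) := by
  induction l generalizing init with
  | nil => simp
  | cons x xs ih => simp [ih, String.toList_append]

-- ''.join = flatten
lemma pvJoinEmptySep (ls : List (List Char)) : PySem.Chars.join [] ls = ls.flatten := by
  induction ls with
  | nil => simp [PySem.Chars.join, List.intercalate]
  | cons x xs ih =>
    cases xs with
    | nil => simp [PySem.Chars.join, List.intercalate]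
    | cons y t =>
      have := ih
      simp [PySem.Chars.join, List.intercalate, List.intersperse] at this ⊢
      simpa [List.intercalate, PySem.Chars.join] using this

-- the core: cycling through cs for k steps = (k / |cs|) whole copies plus the first k % |cs| blocks
lemma pvCycleFlatMap (cs : List (List Char)) (h : cs ≠ []) (k : ℕ) :
    (List.range k).flatMap (fun i => cs.getD (i % cs.length) [])
      = (List.replicate (k / cs.length) cs.flatten).flatten
          ++ (cs.take (k % cs.length)).flatten := by
  have hL : 0 < cs.length := List.length_pos_iff.2 h
  induction k with
  | zero => simp
  | succ k ih =>
    rw [List.range_succ, List.flatMap_append, ih]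
    have hr : k % cs.length < cs.length := Nat.mod_lt _ hL
    have hdm : cs.length * (k / cs.length) + k % cs.length = k := Nat.div_add_mod k cs.length
    have hstep : cs.getD (k % cs.length) [] = cs[k % cs.length] := List.getD_eq_getElem _ _ hr
    simp only [List.flatMap_cons, List.flatMap_nil, List.append_nil, hstep]
    by_cases hrl : k % cs.length + 1 = cs.length
    · have hk1 : k + 1 = cs.length * (k / cs.length + 1) := by
        rw [Nat.mul_add, Nat.mul_one]; omega
      have hmod : (k + 1) % cs.length = 0 := by
        rw [hk1]; exact Nat.mul_mod_right _ _
      have hdiv : (k + 1) / cs.length = k / cs.length + 1 := by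
        rw [hk1]; exact Nat.mul_div_cancel_left _ hL
      have htake : cs.take (k % cs.length) ++ [cs[k % cs.length]] = cs := by
        rw [← List.take_succ_eq_append_getElem hr, hrl, List.take_of_length_le (le_refl _)]
      rw [hmod, hdiv, List.replicate_succ', List.flatten_append]
      have h2 : (cs.take (k % cs.length)).flatten ++ cs[k % cs.length] = cs.flatten := by
        conv_rhs => rw [← htake]
        rw [List.flatten_append]
        simp only [List.flatten_cons, List.flatten_nil, List.append_nil]
      simp only [List.take_zero, List.flatten_nil, List.append_nil, List.flatten_cons,
        List.append_assoc]
      rw [h2]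
    · have hk1 : k + 1 = (k % cs.length + 1) + cs.length * (k / cs.length) := by omega
      have hmod : (k + 1) % cs.length = k % cs.length + 1 := by
        rw [hk1, Nat.add_mul_mod_self_left, Nat.mod_eq_of_lt (by omega)]
      have hdiv : (k + 1) / cs.length = k / cs.length := by
        rw [hk1, Nat.add_mul_div_left _ _ hL, Nat.div_eq_of_lt (by omega), Nat.zero_add]
      rw [hmod, hdiv, List.take_succ_eq_append_getElem hr, List.flatten_append]
      simp [List.append_assoc]

lemma pvMaxToNat (n : Int) : (max n 0).toNat = n.toNat := by omega

-- ===== VERDICT (by name: the statement is the Claim_ definition above) =====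
theorem write_lyrics_spec : Claim_equal_write_lyrics := by
  intro text n _ hpre
  unfold Spec_write_lyrics write_lyrics write_lyrics_alt
  rw [← String.toList_inj]
  set lines := PySem.Str.splitlines text with hlines
  by_cases hl : lines = []
  · have hn : n.toNat = 0 := by
      by_contra hne
      exact (hpre (by omega)) hl
    simp [hl, hn]
  · have hL : 0 < lines.length := List.length_pos_iff.2 hl
    simp only [hl, if_false, pvMaxToNat]
    set cs : List (List Char) := lines.map (fun l => l.toList ++ (" " : String).toList) with hcs
    have hcsne : cs ≠ [] := by simp [hcs, hl]
    have hcslen : cs.length = lines.length := by simp [hcs]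
    -- A side
    have hassoc : (fun (lyr : String) i => lyr ++ lines.getD (i % lines.length) "" ++ " ")
        = fun (lyr : String) i => lyr ++ (lines.getD (i % lines.length) "" ++ " ") := by
      funext a b; rw [String.append_assoc]
    rw [hassoc, pvFoldlToList]
    have hA : (List.range n.toNat).flatMap
        (fun i => ((lines.getD (i % lines.length) "" ++ " ")).toList)
        = (List.range n.toNat).flatMap (fun i => cs.getD (i % cs.length) []) := by
      apply List.flatMap_congr
      intro i _
      have hi : i % lines.length < lines.length := Nat.mod_lt _ hL
      rw [hcslen, String.toList_append,
          List.getD_eq_getElem _ _ hi, List.getD_eq_getElem _ _ (by omega : i % lines.length < cs.length)]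
      simp [hcs]
    rw [hA, pvCycleFlatMap cs hcsne]
    -- B side
    have hblock : (PySem.Str.join "" (lines.map (fun line => line ++ " "))).toList
        = cs.flatten := by
      rw [PySem.Str.toList_join]
      simp only [List.map_map]
      rw [show ("" : String).toList = [] from rfl, pvJoinEmptySep]
      rw [hcs]
      congr 1
      apply List.map_congr_left
      intro l _
      rw [Function.comp_apply, String.toList_append]
    rw [String.toList_append, String.toList_append,
        PySem.Str.toList_join, PySem.Str.toList_join,
        show ("" : String).toList = [] from rfl, pvJoinEmptySep, pvJoinEmptySep]
    rw [List.map_replicate, hblock]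
    have htail : ((lines.take (n.toNat % lines.length)).map (fun line => line ++ " ")).map String.toList
        = cs.take (n.toNat % lines.length) := by
      rw [List.map_map, hcs, ← List.map_take]
      apply List.map_congr_left
      intro l _
      rw [Function.comp_apply, String.toList_append]
    rw [htail, hcslen]
    rfl
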